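-- pv_equiv track=rewrite | github.com/cscba0/neolibrary | gdb/lib/vector.py | draw_vector
-- ===== SOURCE A (Python) =====
-- max_size = 40
--
-- def draw_vector(data):
--     flg = False
--     size = len(data)
--
--     if max_size < size:
--         flg = True
--         mid = max_size // 2
--         fixed = []
--         for i in range(mid):
--             fixed.append(str(data[i]))
--         for i in range(size - mid, size):
--             fixed.append(str(data[i]))
--         data = fixed.copy()
--         size = len(data)
--
--     max_height = 1
--     for i in range(size):
--         height = len(str(data[i]).split("\n"))
--         max_height = max(max_height, height)
--     res = ["│" for _ in range(max_height + 2)]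
--     res[0] = "┌"
--     res[-1] = "└"
--     for i in range(size):
--         if 0 < i:
--             for j in range(1, max_height + 1):
--                 res[j] += "│"
--             res[0] += "┬"
--             res[-1] += "┴"
--         if flg and i == (max_size // 2):
--             res[0] += "───┬"
--             for j in range(1, max_height + 1):
--                 if j == (max_height // 2) + 1:
--                     res[j] += "...│"
--                 else:
--                     res[j] += "   │"
--             res[-1] += "───┴"
--
--         value = str(data[i]).split("\n")
--
--         max_width = 1
--         for j in range(len(value)):
--             max_width = max(max_width, len(value[j]))
--
--         for _ in range(max_width + 2):
--             res[0] += "─"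
--             res[-1] += "─"
--         for j in range(len(value)):
--             res[j + 1] += " "
--             res[j + 1] += value[j]
--             for _ in range(max_width - len(value[j]) + 1):
--                 res[j + 1] += " "
--     res[0] += "┐"
--     res[-1] += "┘"
--     for j in range(1, max_height + 1):
--         res[j] += "│"
--     return "\n" + "\n".join(res)
-- ===== SOURCE B (Python) =====
-- max_size = 40
--
--
-- def _block(s):
--     """Self-contained column for one value: (top/bottom dashes, padded body)."""
--     return ("\u2500" * (len(s) + 2), " " + s + " ")
--
--
-- def draw_vector(data):
--     mid = max_size // 2
--     if len(data) > max_size: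
--         cells = ([_block(str(x)) for x in data[:mid]]
--                  + [("\u2500\u2500\u2500", "...")]
--                  + [_block(str(x)) for x in data[-mid:]])
--     else:
--         cells = [_block(str(x)) for x in data]
--     tops = [t for t, _ in cells]
--     bodies = [b for _, b in cells]
--     top = "\u250c" + "\u252c".join(tops) + "\u2510"
--     body = "\u2502" + "\u2502".join(bodies) + "\u2502"
--     bottom = "\u2514" + "\u2534".join(tops) + "\u2518"
--     return "\n" + "\n".join([top, body, bottom])
-- ===== Notes on version B (the rewrite author's own statement) =====
-- stated objective: simpler
-- what changed: Instead of mutating a shared list of row-strings column by column with index-dependent separator branches, B renders each value into a self-contained (top,body) block, inserts one ellipsis block when truncating, and assembles the three rows by joining the blocks with the separator characters.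
import Mathlib
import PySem

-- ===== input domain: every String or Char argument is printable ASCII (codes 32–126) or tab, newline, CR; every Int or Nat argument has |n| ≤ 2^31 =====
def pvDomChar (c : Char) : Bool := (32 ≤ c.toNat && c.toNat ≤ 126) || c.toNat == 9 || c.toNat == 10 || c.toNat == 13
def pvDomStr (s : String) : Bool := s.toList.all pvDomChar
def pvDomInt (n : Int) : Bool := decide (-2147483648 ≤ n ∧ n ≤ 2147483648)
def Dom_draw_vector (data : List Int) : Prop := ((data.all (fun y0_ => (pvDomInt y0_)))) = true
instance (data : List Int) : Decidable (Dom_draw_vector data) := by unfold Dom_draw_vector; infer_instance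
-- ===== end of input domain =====

-- B renders each value as a self-contained (top, body) block and joins the blocks,
-- instead of A's column-by-column mutation of a shared list of row strings (objective: simpler).

-- ===== PORT A =====
-- the 'if 0 < i' block: '│' onto each body row, '┬' onto the top row, '┴' onto the bottom row
def pvSepRows (maxH : Nat) (res : List (List Char)) : List (List Char) :=
  let res := (PySem.List.pyRange 1 ((maxH : Int) + 1) 1).foldl
    (fun r j => PySem.List.pySetD r j (PySem.List.pyGetD r j [] ++ ['│'])) res
  let res := PySem.List.pySetD res 0 (PySem.List.pyGetD res 0 [] ++ ['┬'])
  PySem.List.pySetD res (-1) (PySem.List.pyGetD res (-1) [] ++ ['┴'])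

-- the 'if flg and i == max_size // 2' block (the '...' column)
def pvEllRows (maxH : Nat) (res : List (List Char)) : List (List Char) :=
  let res := PySem.List.pySetD res 0 (PySem.List.pyGetD res 0 [] ++ ['─','─','─','┬'])
  let res := (PySem.List.pyRange 1 ((maxH : Int) + 1) 1).foldl
    (fun r j =>
      if j == PySem.Int.floordiv (maxH : Int) 2 + 1 then
        PySem.List.pySetD r j (PySem.List.pyGetD r j [] ++ ['.','.','.','│'])
      else
        PySem.List.pySetD r j (PySem.List.pyGetD r j [] ++ [' ',' ',' ','│'])) res
  PySem.List.pySetD res (-1) (PySem.List.pyGetD res (-1) [] ++ ['─','─','─','┴'])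

-- 'for _ in range(max_width + 2): res[0] += "─"; res[-1] += "─"'
def pvDashLoop (maxW : Nat) (res : List (List Char)) : List (List Char) :=
  (PySem.List.pyRange 0 ((maxW : Int) + 2) 1).foldl
    (fun r _ =>
      let r := PySem.List.pySetD r 0 (PySem.List.pyGetD r 0 [] ++ ['─'])
      PySem.List.pySetD r (-1) (PySem.List.pyGetD r (-1) [] ++ ['─'])) res

-- 'for j in range(len(value)): …' body rows
def pvBodyLoop (value : List (List Char)) (maxW : Nat) (res : List (List Char)) : List (List Char) :=
  (PySem.List.pyRange 0 ((value.length : Nat) : Int) 1).foldl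
    (fun r j =>
      let v := PySem.List.pyGetD value j []
      let r := PySem.List.pySetD r (j+1) (PySem.List.pyGetD r (j+1) [] ++ [' '])
      let r := PySem.List.pySetD r (j+1) (PySem.List.pyGetD r (j+1) [] ++ v)
      (PySem.List.pyRange 0 ((maxW : Int) - (v.length : Int) + 1) 1).foldl
        (fun r2 _ => PySem.List.pySetD r2 (j+1) (PySem.List.pyGetD r2 (j+1) [] ++ [' '])) r) res

-- one iteration of A's main 'for i in range(size)' loop
def pvStepA (maxH : Nat) (flg : Bool) (items : List (List Char)) (res : List (List Char)) (i : Int) : List (List Char) :=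
  let res := if 0 < i then pvSepRows maxH res else res
  let res := if flg && (i == PySem.Int.floordiv 40 2) then pvEllRows maxH res else res
  let value := PySem.Chars.splitOn (PySem.List.pyGetD items i []) ['\n']
  let maxW : Nat := (PySem.List.pyRange 0 ((value.length : Nat) : Int) 1).foldl
    (fun w j => max w (PySem.List.pyGetD value j []).length) 1
  pvBodyLoop value maxW (pvDashLoop maxW res)

-- everything after the truncation step (str(data[i]) is applied once, up front)
def pvRender (flg : Bool) (items : List (List Char)) : String :=
  let size2 : Int := (items.length : Int)
  let maxH : Nat := (PySem.List.pyRange 0 size2 1).foldl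
    (fun m i => max m (PySem.Chars.splitOn (PySem.List.pyGetD items i []) ['\n']).length) 1
  let res : List (List Char) := (List.range (maxH + 2)).map (fun _ => ['│'])
  let res := PySem.List.pySetD res 0 ['┌']
  let res := PySem.List.pySetD res (-1) ['└']
  let res := (PySem.List.pyRange 0 size2 1).foldl (pvStepA maxH flg items) res
  let res := PySem.List.pySetD res 0 (PySem.List.pyGetD res 0 [] ++ ['┐'])
  let res := PySem.List.pySetD res (-1) (PySem.List.pyGetD res (-1) [] ++ ['┘'])
  let res := (PySem.List.pyRange 1 ((maxH : Int) + 1) 1).foldl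
    (fun r j => PySem.List.pySetD r j (PySem.List.pyGetD r j [] ++ ['│'])) res
  String.ofList ('\n' :: PySem.Chars.join ['\n'] res)

def draw_vector (data : List Int) : String :=
  let size : Int := (data.length : Int)
  let flg : Bool := decide (40 < size)
  let mid : Int := PySem.Int.floordiv 40 2
  let items : List (List Char) :=
    if 40 < size then
      ((PySem.List.pyRange 0 mid 1).map (fun i => PySem.Int.toChars (PySem.List.pyGetD data i 0))) ++
      ((PySem.List.pyRange (size - mid) size 1).map (fun i => PySem.Int.toChars (PySem.List.pyGetD data i 0)))
    else
      data.map (fun x => PySem.Int.toChars x)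
  pvRender flg items

-- ===== PORT B =====
-- one self-contained column: (top/bottom dashes, padded body)
def pvBlock (s : List Char) : List Char × List Char :=
  (List.replicate (s.length + 2) '─', ' ' :: (s ++ [' ']))

def draw_vector_alt (data : List Int) : String :=
  let mid : Int := PySem.Int.floordiv 40 2
  let cells : List (List Char × List Char) :=
    if (data.length : Int) > 40 then
      (PySem.List.slice data none (some mid)).map (fun x => pvBlock (PySem.Int.toChars x))
        ++ [(['─','─','─'], ['.','.','.'])]
        ++ (PySem.List.slice data (some (-mid)) none).map (fun x => pvBlock (PySem.Int.toChars x))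
    else data.map (fun x => pvBlock (PySem.Int.toChars x))
  let tops := cells.map Prod.fst
  let bodies := cells.map Prod.snd
  let top := '┌' :: (PySem.Chars.join ['┬'] tops ++ ['┐'])
  let body := '│' :: (PySem.Chars.join ['│'] bodies ++ ['│'])
  let bottom := '└' :: (PySem.Chars.join ['┴'] tops ++ ['┘'])
  String.ofList ('\n' :: PySem.Chars.join ['\n'] [top, body, bottom])

-- ===== PRECONDITION & SPEC =====
def Spec_draw_vector (data : List Int) (out : String) : Prop := out = draw_vector_alt data
instance (data : List Int) (out : String) : Decidable (Spec_draw_vector data out) := by unfold Spec_draw_vector; infer_instance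

-- ===== CLAIM (what is proved, stated in full; the proofs are below) =====
def Claim_equal_draw_vector : Prop := ∀ (data : List Int), Dom_draw_vector data → Spec_draw_vector data (draw_vector data)


-- ===== LEMMAS AND PROOFS =====

-- str(int) is one nonempty line: digit characters only (plus a leading '-')

theorem pvDigitChar_ne_nl (d : Nat) : Nat.digitChar d ≠ '\n' := by
  by_cases h : d < 16
  · interval_cases d <;> decide
  · simp only [Nat.digitChar, if_neg (by omega : ¬ d = 0), if_neg (by omega : ¬ d = 1),
      if_neg (by omega : ¬ d = 2), if_neg (by omega : ¬ d = 3), if_neg (by omega : ¬ d = 4),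
      if_neg (by omega : ¬ d = 5), if_neg (by omega : ¬ d = 6), if_neg (by omega : ¬ d = 7),
      if_neg (by omega : ¬ d = 8), if_neg (by omega : ¬ d = 9), if_neg (by omega : ¬ d = 10),
      if_neg (by omega : ¬ d = 11), if_neg (by omega : ¬ d = 12), if_neg (by omega : ¬ d = 13),
      if_neg (by omega : ¬ d = 14), if_neg (by omega : ¬ d = 15)]
    decide

theorem pvToDigitsCore_succ (b f n : Nat) (acc : List Char) : Nat.toDigitsCore b (f+1) n acc =
    (if n / b = 0 then (n % b).digitChar :: acc else Nat.toDigitsCore b f (n / b) ((n % b).digitChar :: acc)) := by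
  conv_lhs => rw [Nat.toDigitsCore]

theorem pvMemToDigitsCore (b f n : Nat) (acc : List Char) (c : Char)
    (h : c ∈ Nat.toDigitsCore b f n acc) : c ∈ acc ∨ ∃ d, c = Nat.digitChar d := by
  induction f generalizing n acc with
  | zero => exact Or.inl h
  | succ f ih =>
    rw [pvToDigitsCore_succ] at h
    split at h
    · rcases List.mem_cons.mp h with h | h
      · exact Or.inr ⟨_, h⟩
      · exact Or.inl h
    · rcases ih _ _ h with h' | h'
      · rcases List.mem_cons.mp h' with h'' | h''
        · exact Or.inr ⟨_, h''⟩
        · exact Or.inl h''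
      · exact Or.inr h'

theorem pvToDigitsCore_ne_nil (b f n : Nat) (acc : List Char) (hf : f ≠ 0 ∨ acc ≠ []) :
    Nat.toDigitsCore b f n acc ≠ [] := by
  induction f generalizing n acc with
  | zero => exact hf.resolve_left (by simp)
  | succ f ih =>
    rw [pvToDigitsCore_succ]
    split
    · simp
    · exact ih _ _ (Or.inr (by simp))

theorem pvNl_not_mem_toChars (n : Int) : '\n' ∉ PySem.Int.toChars n := by
  unfold PySem.Int.toChars Nat.toDigits
  split <;> intro h
  · rcases List.mem_cons.mp h with h | h
    · exact absurd h (by decide)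
    · rcases pvMemToDigitsCore _ _ _ _ _ h with h' | ⟨d, h'⟩
      · simp at h'
      · exact pvDigitChar_ne_nl d h'.symm
  · rcases pvMemToDigitsCore _ _ _ _ _ h with h' | ⟨d, h'⟩
    · simp at h'
    · exact pvDigitChar_ne_nl d h'.symm

theorem pvToChars_ne_nil (n : Int) : PySem.Int.toChars n ≠ [] := by
  unfold PySem.Int.toChars Nat.toDigits
  split
  · simp
  · exact pvToDigitsCore_ne_nil _ _ _ _ (Or.inl (by simp))

theorem pvGo_no_sep (c : Char) (fuel : Nat) (l cur : List Char) (acc : List (List Char)) (h : c ∉ l) :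
    PySem.Chars.splitOn.go [c] fuel l cur acc = ((cur.reverse ++ l) :: acc).reverse := by
  induction fuel generalizing l cur acc with
  | zero => rfl
  | succ fuel ih =>
    cases l with
    | nil => simp [PySem.Chars.splitOn.go]
    | cons c' rest =>
      have hne : ¬ ([c].isPrefixOf (c' :: rest) = true) := by
        simp only [List.isPrefixOf_cons₂, List.isPrefixOf_nil_left, Bool.and_true, beq_iff_eq]
        intro he; exact h (he ▸ List.mem_cons_self)
      conv_lhs => rw [PySem.Chars.splitOn.go]
      rw [if_neg hne, ih rest (c' :: cur) acc (fun hm => h (List.mem_cons_of_mem _ hm))]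
      simp

theorem pvSplitOn_single (s : List Char) (c : Char) (h : c ∉ s) :
    PySem.Chars.splitOn s [c] = [s] := by
  unfold PySem.Chars.splitOn
  rw [pvGo_no_sep _ _ _ _ _ h]
  simp

theorem pvSplitOn_toChars (x : Int) :
    PySem.Chars.splitOn (PySem.Int.toChars x) ['\n'] = [PySem.Int.toChars x] :=
  pvSplitOn_single _ _ (pvNl_not_mem_toChars x)

-- 3-row state updates

theorem pvSet0 (t m b v : List Char) : PySem.List.pySetD [t,m,b] 0 v = [v,m,b] := by
  simp [PySem.List.pySetD, PySem.List.pySet?, PySem.List.pyIdx?]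
theorem pvSet1 (t m b v : List Char) : PySem.List.pySetD [t,m,b] 1 v = [t,v,b] := by
  simp [PySem.List.pySetD, PySem.List.pySet?, PySem.List.pyIdx?]
theorem pvSetLast (t m b v : List Char) : PySem.List.pySetD [t,m,b] (-1) v = [t,m,v] := by
  simp [PySem.List.pySetD, PySem.List.pySet?, PySem.List.pyIdx?]
theorem pvGet0 (t m b : List Char) : PySem.List.pyGetD [t,m,b] 0 [] = t := by
  simp [PySem.List.pyGetD, PySem.List.pyGet?, PySem.List.pyIdx?]
theorem pvGet1 (t m b : List Char) : PySem.List.pyGetD [t,m,b] 1 [] = m := by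
  simp [PySem.List.pyGetD, PySem.List.pyGet?, PySem.List.pyIdx?]
theorem pvGetLast (t m b : List Char) : PySem.List.pyGetD [t,m,b] (-1) [] = b := by
  simp [PySem.List.pyGetD, PySem.List.pyGet?, PySem.List.pyIdx?]
theorem pvGetSingle (s : List Char) : PySem.List.pyGetD [s] 0 [] = s := by
  simp [PySem.List.pyGetD, PySem.List.pyGet?, PySem.List.pyIdx?]

-- the two row fragments of one rendered column
def pvTopOf (s : List Char) : List Char := List.replicate (s.length + 2) '─'
def pvBodyOf (s : List Char) : List Char := ' ' :: (s ++ [' '])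
-- separator-prefixed concatenation of row fragments
def pvCatL (c : Char) (ys : List (List Char)) : List Char := ys.flatMap (fun y => c :: y)

theorem pvBlock_fst (s : List Char) : (pvBlock s).1 = pvTopOf s := rfl
theorem pvBlock_snd (s : List Char) : (pvBlock s).2 = pvBodyOf s := rfl

theorem pvCatL_nil (c : Char) : pvCatL c [] = [] := rfl
theorem pvCatL_cons (c : Char) (y : List Char) (ys : List (List Char)) :
    pvCatL c (y :: ys) = (c :: y) ++ pvCatL c ys := rfl
theorem pvCatL_append (c : Char) (ys zs : List (List Char)) :
    pvCatL c (ys ++ zs) = pvCatL c ys ++ pvCatL c zs := by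
  simp [pvCatL]

theorem pvJoin_cons (c : Char) (y : List Char) (ys : List (List Char)) :
    PySem.Chars.join [c] (y :: ys) = y ++ pvCatL c ys := by
  induction ys generalizing y with
  | nil => simp [PySem.Chars.join, List.intercalate, List.intersperse, pvCatL]
  | cons z zs ih =>
    rw [pvCatL_cons]
    have : PySem.Chars.join [c] (y :: z :: zs) = y ++ [c] ++ PySem.Chars.join [c] (z :: zs) := by
      simp [PySem.Chars.join, List.intercalate, List.intersperse]
    rw [this, ih]
    simp

-- the per-helper computations, for max_height = 1 and a single-line nonempty value

theorem pvSepRows_eq (t m b : List Char) :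
    pvSepRows 1 [t, m, b] = [t ++ ['\u252c'], m ++ ['\u2502'], b ++ ['\u2534']] := by
  unfold pvSepRows
  rw [show PySem.List.pyRange 1 (((1:Nat) : Int) + 1) 1 = [1] from by decide]
  simp only [List.foldl_cons, List.foldl_nil, pvSet0, pvSet1, pvSetLast, pvGet0, pvGet1, pvGetLast]

theorem pvEllRows_eq (t m b : List Char) :
    pvEllRows 1 [t, m, b] =
      [t ++ ['\u2500','\u2500','\u2500','\u252c'], m ++ ['.','.','.','\u2502'],
       b ++ ['\u2500','\u2500','\u2500','\u2534']] := by
  unfold pvEllRows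
  rw [show PySem.List.pyRange 1 (((1:Nat) : Int) + 1) 1 = [1] from by decide]
  simp only [List.foldl_cons, List.foldl_nil, pvSet0, pvSet1, pvSetLast, pvGet0, pvGet1, pvGetLast]
  rw [if_pos (by decide)]
  simp only [pvSet1, pvGet1, pvSet0, pvGet0, pvSetLast, pvGetLast]

theorem pvDashLoop_eq (w : Nat) (t m b : List Char) :
    pvDashLoop w [t, m, b] = [t ++ List.replicate (w + 2) '\u2500', m, b ++ List.replicate (w + 2) '\u2500'] := by
  unfold pvDashLoop
  rw [show ((w : Int) + 2) = ((w + 2 : Nat) : Int) from by push_cast; ring]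
  induction (w + 2) generalizing t m b with
  | zero => simp
  | succ k ih =>
    rw [show ((k + 1 : Nat) : Int) = (k : Int) + 1 from by push_cast; ring,
      PySem.List.pyRange_one_succ_right (by positivity), List.foldl_append, ih]
    simp only [List.foldl_cons, List.foldl_nil, pvSet0, pvGet0, pvGetLast, pvSetLast,
      List.replicate_succ', List.append_assoc]

theorem pvBodyLoop_eq (s : List Char) (t m b : List Char) :
    pvBodyLoop [s] s.length [t, m, b] = [t, m ++ pvBodyOf s, b] := by
  unfold pvBodyLoop
  rw [show (([s].length : Nat) : Int) = ((1:Nat) : Int) from by norm_num,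
    show PySem.List.pyRange 0 ((1:Nat) : Int) 1 = [0] from by decide]
  simp only [List.foldl_cons, List.foldl_nil, pvGetSingle, List.length_singleton]
  rw [show ((s.length : Int) - (s.length : Int) + 1) = ((1:Nat) : Int) from by push_cast; ring,
    show PySem.List.pyRange 0 ((1:Nat) : Int) 1 = [0] from by decide]
  simp only [show ((0:Int) + 1) = (1:Int) from rfl, pvSet1, pvGet1, List.foldl_cons, List.foldl_nil]
  simp [pvBodyOf]

theorem pvMaxW_eq (s : List Char) (hne : s ≠ []) :
    (PySem.List.pyRange 0 ((([s].length : Nat)) : Int) 1).foldl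
      (fun w j => max w (PySem.List.pyGetD [s] j []).length) 1 = s.length := by
  rw [show (([s].length : Nat) : Int) = ((1:Nat) : Int) from by norm_num,
    show PySem.List.pyRange 0 ((1:Nat) : Int) 1 = [0] from by decide]
  simp only [List.foldl_cons, List.foldl_nil, pvGetSingle]
  exact Nat.max_eq_right (Nat.one_le_iff_ne_zero.mpr (by simpa using hne))

theorem pvStepA_eq (flg : Bool) (items : List (List Char)) (i : Int) (x : Int)
    (hx : PySem.List.pyGetD items i [] = PySem.Int.toChars x) (t m bo : List Char) :
    pvStepA 1 flg items [t, m, bo] i =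
      [t ++ (if 0 < i then ['\u252c'] else []) ++ (if flg && (i == 20) then ['\u2500','\u2500','\u2500','\u252c'] else [])
         ++ pvTopOf (PySem.List.pyGetD items i []),
       m ++ (if 0 < i then ['\u2502'] else []) ++ (if flg && (i == 20) then ['.','.','.','\u2502'] else [])
         ++ pvBodyOf (PySem.List.pyGetD items i []),
       bo ++ (if 0 < i then ['\u2534'] else []) ++ (if flg && (i == 20) then ['\u2500','\u2500','\u2500','\u2534'] else [])
         ++ pvTopOf (PySem.List.pyGetD items i [])] := by
  have hne : PySem.List.pyGetD items i [] ≠ [] := hx ▸ pvToChars_ne_nil x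
  have hsplit : PySem.Chars.splitOn (PySem.List.pyGetD items i []) ['\n'] = [PySem.List.pyGetD items i []] := by
    rw [hx]; exact pvSplitOn_toChars x
  unfold pvStepA
  rw [show PySem.Int.floordiv 40 2 = (20 : Int) from by decide, hsplit]
  dsimp only
  rw [
    pvMaxW_eq _ hne]
  by_cases h1 : 0 < i <;> by_cases h2 : (flg && (i == 20)) = true <;>
    simp only [h1, h2, if_true, if_false, ite_true, ite_false, Bool.false_eq_true,
      pvSepRows_eq, pvEllRows_eq, pvDashLoop_eq, pvBodyLoop_eq, pvTopOf, List.append_assoc,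
      List.nil_append, List.append_nil] <;>
    simp [h1, h2]

-- A's main loop over a contiguous index segment that starts past the first column
-- and avoids the ellipsis index

theorem pvFoldSeg (flg : Bool) (items : List (List Char))
    (hall : ∀ it ∈ items, ∃ x, it = PySem.Int.toChars x)
    (a n : Nat) (ha : 1 ≤ a) (hn : a + n ≤ items.length)
    (h20 : ∀ i : Nat, a ≤ i → i < a + n → (flg = true → i ≠ 20))
    (t m bo : List Char) :
    (PySem.List.pyRange (a : Int) ((a + n : Nat) : Int) 1).foldl (pvStepA 1 flg items) [t, m, bo] =
      [t ++ pvCatL '\u252c' (((items.drop a).take n).map pvTopOf),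
       m ++ pvCatL '\u2502' (((items.drop a).take n).map pvBodyOf),
       bo ++ pvCatL '\u2534' (((items.drop a).take n).map pvTopOf)] := by
  induction n with
  | zero =>
    rw [show ((a + 0 : Nat) : Int) = (a : Int) from by norm_num,
      PySem.List.pyRange_one_eq_nil (le_refl _)]
    simp [pvCatL]
  | succ n ih =>
    have hbound : a + n < items.length := by omega
    have hmem : items[a + n] ∈ items := List.getElem_mem _
    obtain ⟨x, hx⟩ := hall _ hmem
    have hget : PySem.List.pyGetD items ((a + n : Nat) : Int) [] = items[a + n] := by
      rw [PySem.List.pyGetD_natCast, List.getD_eq_getElem _ _ hbound]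
    rw [show ((a + (n + 1) : Nat) : Int) = ((a + n : Nat) : Int) + 1 from by push_cast; ring,
      PySem.List.pyRange_one_succ_right (by exact_mod_cast Nat.le_add_right a n),
      List.foldl_append, ih (by omega) (fun i h1 h2 hf => h20 i h1 (by omega) hf)]
    simp only [List.foldl_cons, List.foldl_nil]
    rw [pvStepA_eq flg items _ x (hget.trans hx)]
    have hpos : (0 : Int) < ((a + n : Nat) : Int) := by exact_mod_cast Nat.lt_of_lt_of_le Nat.zero_lt_one (by omega)
    have hflg : (flg && (((a + n : Nat) : Int) == 20)) = false := by
      cases flg with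
      | false => rfl
      | true =>
        have : a + n ≠ 20 := h20 (a + n) (by omega) (by omega) rfl
        simp only [Bool.true_and, beq_eq_false_iff_ne, ne_eq]
        exact_mod_cast this
    have htake : (items.drop a).take (n + 1) = (items.drop a).take n ++ [items[a + n]] := by
      rw [List.take_succ]
      congr 1
      rw [List.getElem?_drop]
      simp [List.getElem?_eq_getElem (by omega : a + n < items.length)]
    rw [htake, hget]
    simp only [List.map_append, List.map_cons, List.map_nil, pvCatL_append, if_pos hpos, hflg,
      Bool.false_eq_true, if_false, ite_false]
    simp [pvCatL, List.append_assoc]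

-- max_height over int items is 1

theorem pvFoldMax1 (items : List (List Char))
    (hall : ∀ it ∈ items, ∃ x, it = PySem.Int.toChars x) :
    items.foldl (fun m it => max m (PySem.Chars.splitOn it ['\n']).length) 1 = 1 := by
  induction items with
  | nil => rfl
  | cons s rest ih =>
    obtain ⟨x, hx⟩ := hall s List.mem_cons_self
    simp only [List.foldl_cons, hx, pvSplitOn_toChars, List.length_singleton]
    exact ih (fun it h => hall it (List.mem_cons_of_mem _ h))

theorem pvMaxH (items : List (List Char))
    (hall : ∀ it ∈ items, ∃ x, it = PySem.Int.toChars x) :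
    (PySem.List.pyRange 0 ((items.length : Nat) : Int) 1).foldl
      (fun m i => max m (PySem.Chars.splitOn (PySem.List.pyGetD items i []) ['\n']).length) 1 = 1 := by
  rw [PySem.List.foldl_pyRange_zero_pyGetD' items []
    (fun m it => max m (PySem.Chars.splitOn it ['\n']).length) 1]
  exact pvFoldMax1 items hall

-- the rendering for a non-truncated vector

theorem pvRender_notrunc (items : List (List Char))
    (hall : ∀ it ∈ items, ∃ x, it = PySem.Int.toChars x) :
    pvRender false items = String.ofList ('\n' :: PySem.Chars.join ['\n']
      ['\u250c' :: (PySem.Chars.join ['\u252c'] (items.map pvTopOf) ++ ['\u2510']),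
       '\u2502' :: (PySem.Chars.join ['\u2502'] (items.map pvBodyOf) ++ ['\u2502']),
       '\u2514' :: (PySem.Chars.join ['\u2534'] (items.map pvTopOf) ++ ['\u2518'])]) := by
  unfold pvRender
  dsimp only
  rw [pvMaxH items hall,
    show PySem.List.pySetD (PySem.List.pySetD ((List.range (1 + 2)).map
      (fun _ => (['\u2502'] : List Char))) 0 ['\u250c']) (-1) ['\u2514'] = [['\u250c'],['\u2502'],['\u2514']] from by decide]
  cases items with
  | nil =>
    simp only [show (((List.nil : List (List Char)).length : Nat) : Int) = (0 : Int) from rfl,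
      PySem.List.pyRange_one_eq_nil (le_refl (0:Int)), List.foldl_nil, pvSet0, pvGet0, pvSetLast,
      pvGetLast, List.map_nil]
    decide
  | cons s rest =>
    obtain ⟨x, hx⟩ := hall s List.mem_cons_self
    have hmain : List.foldl (pvStepA 1 false (s :: rest)) [['\u250c'],['\u2502'],['\u2514']]
        (PySem.List.pyRange 0 (((s :: rest).length : Nat) : Int) 1) =
        [['\u250c'] ++ pvTopOf s ++ pvCatL '\u252c' ((rest.take rest.length).map pvTopOf),
         ['\u2502'] ++ pvBodyOf s ++ pvCatL '\u2502' ((rest.take rest.length).map pvBodyOf),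
         ['\u2514'] ++ pvTopOf s ++ pvCatL '\u2534' ((rest.take rest.length).map pvTopOf)] := by
      rw [PySem.List.pyRange_one_cons
          (show (0:Int) < (((s :: rest).length : Nat) : Int) from by exact_mod_cast Nat.succ_pos rest.length),
        List.foldl_cons,
        pvStepA_eq false (s :: rest) 0 x (by rw [PySem.List.pyGetD_zero_cons]; exact hx)]
      simp only [if_neg (lt_irrefl (0:Int)), Bool.false_and, Bool.false_eq_true, if_false,
        ite_false, List.nil_append, List.append_nil]
      rw [show ((0:Int) + 1) = ((1 : Nat) : Int) from by norm_num,
        show (((s :: rest).length : Nat) : Int) = ((1 + rest.length : Nat) : Int) from by push_cast [List.length_cons]; ring,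
        pvFoldSeg false (s :: rest) hall 1 rest.length (le_refl _) (by simp; omega) (fun _ _ _ h => by cases h)]
      rw [PySem.List.pyGetD_zero_cons, List.drop_succ_cons, List.drop_zero]
    rw [hmain]
    simp only [pvSet0, pvGet0, pvSetLast, pvGetLast,
      show PySem.List.pyRange 1 (((1:Nat) : Int) + 1) 1 = [1] from by decide,
      List.foldl_cons, List.foldl_nil, pvSet1, pvGet1, List.take_length]
    rw [List.map_cons, List.map_cons]
    simp only [pvJoin_cons]
    simp [List.append_assoc]

-- the rendering for a truncated vector (exactly 40 retained items)

theorem pvRender_trunc (items : List (List Char))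
    (hall : ∀ it ∈ items, ∃ x, it = PySem.Int.toChars x)
    (hlen : items.length = 40) :
    pvRender true items = String.ofList ('\n' :: PySem.Chars.join ['\n']
      ['\u250c' :: (PySem.Chars.join ['\u252c'] ((items.take 20).map pvTopOf ++ [['\u2500','\u2500','\u2500']] ++ (items.drop 20).map pvTopOf) ++ ['\u2510']),
       '\u2502' :: (PySem.Chars.join ['\u2502'] ((items.take 20).map pvBodyOf ++ [['.','.','.']] ++ (items.drop 20).map pvBodyOf) ++ ['\u2502']),
       '\u2514' :: (PySem.Chars.join ['\u2534'] ((items.take 20).map pvTopOf ++ [['\u2500','\u2500','\u2500']] ++ (items.drop 20).map pvTopOf) ++ ['\u2518'])]) := by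
  cases items with
  | nil => simp at hlen
  | cons s rest =>
  have hrest : rest.length = 39 := by simpa using hlen
  obtain ⟨x0, hx0⟩ := hall s List.mem_cons_self
  have h19 : (19 : Nat) < rest.length := by omega
  have hmem19 : rest[19] ∈ (s :: rest) := List.mem_cons_of_mem _ (List.getElem_mem _)
  obtain ⟨x20, hx20⟩ := hall _ hmem19
  have hget20 : PySem.List.pyGetD (s :: rest) (20 : Int) [] = rest[19] := by
    rw [show (20 : Int) = ((20 : Nat) : Int) from by norm_num, PySem.List.pyGetD_natCast]
    simp [List.getD_cons_succ, List.getD, List.getElem?_eq_getElem, h19]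
  unfold pvRender
  dsimp only
  rw [pvMaxH _ hall,
    show PySem.List.pySetD (PySem.List.pySetD ((List.range (1 + 2)).map
      (fun _ => (['\u2502'] : List Char))) 0 ['\u250c']) (-1) ['\u2514'] = [['\u250c'],['\u2502'],['\u2514']] from by decide]
  have hmain : List.foldl (pvStepA 1 true (s :: rest)) [['\u250c'],['\u2502'],['\u2514']]
      (PySem.List.pyRange 0 (((s :: rest).length : Nat) : Int) 1) =
      [['\u250c'] ++ pvTopOf s ++ pvCatL '\u252c' ((rest.take 19).map pvTopOf)
         ++ ['\u252c'] ++ ['\u2500','\u2500','\u2500','\u252c'] ++ pvTopOf rest[19]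
         ++ pvCatL '\u252c' ((rest.drop 20).map pvTopOf),
       ['\u2502'] ++ pvBodyOf s ++ pvCatL '\u2502' ((rest.take 19).map pvBodyOf)
         ++ ['\u2502'] ++ ['.','.','.','\u2502'] ++ pvBodyOf rest[19]
         ++ pvCatL '\u2502' ((rest.drop 20).map pvBodyOf),
       ['\u2514'] ++ pvTopOf s ++ pvCatL '\u2534' ((rest.take 19).map pvTopOf)
         ++ ['\u2534'] ++ ['\u2500','\u2500','\u2500','\u2534'] ++ pvTopOf rest[19]
         ++ pvCatL '\u2534' ((rest.drop 20).map pvTopOf)] := by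
    rw [show (((s :: rest).length : Nat) : Int) = (40 : Int) from by rw [hlen]; norm_num,
      PySem.List.pyRange_one_append 0 20 40 (by norm_num) (by norm_num),
      PySem.List.pyRange_one_cons (by norm_num : (0:Int) < 20),
      PySem.List.pyRange_one_cons (by norm_num : (20:Int) < 40),
      List.foldl_append, List.foldl_cons, List.foldl_cons,
      pvStepA_eq true (s :: rest) 0 x0 (by rw [PySem.List.pyGetD_zero_cons]; exact hx0)]
    simp only [if_neg (lt_irrefl (0:Int)), show ((0:Int) == 20) = false from rfl, Bool.and_false,
      Bool.false_eq_true, if_false, ite_false, List.nil_append, List.append_nil]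
    have hseg1 := pvFoldSeg true (s :: rest) hall 1 19 (le_refl _) (by simp; omega)
      (fun i h1 h2 _ => by omega)
    rw [show ((1:Nat) : Int) = (1 : Int) from rfl, show ((1 + 19 : Nat) : Int) = (20 : Int) from by norm_num] at hseg1
    rw [show ((0:Int) + 1) = (1 : Int) from by norm_num, hseg1,
      pvStepA_eq true (s :: rest) 20 x20 (hget20.trans hx20)]
    simp only [if_pos (by norm_num : (0:Int) < 20), show ((20:Int) == 20) = true from rfl,
      Bool.and_true, Bool.true_and, if_pos rfl, ite_true]
    have hseg2 := pvFoldSeg true (s :: rest) hall 21 19 (by norm_num) (by simp; omega)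
      (fun i h1 h2 _ => by omega)
    rw [show ((21:Nat) : Int) = (21 : Int) from by norm_num, show ((21 + 19 : Nat) : Int) = (40 : Int) from by norm_num] at hseg2
    rw [show ((20:Int) + 1) = (21 : Int) from by norm_num, hseg2, hget20]
    have hto : ((s :: rest).drop 1).take 19 = rest.take 19 := rfl
    have hto2 : ((s :: rest).drop 21).take 19 = rest.drop 20 := by
      rw [show (s :: rest).drop 21 = rest.drop 20 from rfl, List.take_of_length_le (by simp; omega)]
    rw [hto, hto2]
    simp [List.append_assoc]
  rw [hmain]
  simp only [pvSet0, pvGet0, pvSetLast, pvGetLast,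
    show PySem.List.pyRange 1 (((1:Nat) : Int) + 1) 1 = [1] from by decide,
    List.foldl_cons, List.foldl_nil, pvSet1, pvGet1]
  have htake : (s :: rest).take 20 = s :: rest.take 19 := rfl
  have hdrop20 : (s :: rest).drop 20 = rest.drop 19 := rfl
  have hsplit19 : rest.drop 19 = rest[19] :: rest.drop 20 := List.drop_eq_getElem_cons h19
  rw [htake, hdrop20, hsplit19]
  simp only [List.map_cons, List.map_append, List.cons_append]
  simp only [pvJoin_cons]
  simp only [pvCatL_append, pvCatL_cons, pvCatL_nil]
  simp [List.append_assoc]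

-- items as produced by A's truncation step, in terms of take/drop

theorem pvRangeMapTake (data : List Int) (j : Nat) (hj : j ≤ data.length) :
    (PySem.List.pyRange 0 ((j : Nat) : Int) 1).map
      (fun i => PySem.Int.toChars (PySem.List.pyGetD data i 0)) =
      (data.take j).map (fun x => PySem.Int.toChars x) := by
  rw [PySem.List.pyRange_one, List.map_map]
  apply List.ext_getElem
  · simp; omega
  · intro k h1 h2
    simp only [List.getElem_map, List.getElem_range, Function.comp_apply]
    have hk : k < j := by simpa using h1
    congr 1
    rw [show (0 : Int) + (k : Int) = ((k : Nat) : Int) from by ring,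
      PySem.List.pyGetD_natCast, List.getD_eq_getElem _ _ (by omega), List.getElem_take]

theorem pvAllToChars (l : List Int) :
    ∀ it ∈ l.map (fun x => PySem.Int.toChars x), ∃ x, it = PySem.Int.toChars x := by
  intro it hit
  rcases List.mem_map.mp hit with ⟨x, _, hx⟩
  exact ⟨x, hx.symm⟩

theorem draw_vector_spec : Claim_equal_draw_vector := by
  intro data _
  unfold Spec_draw_vector draw_vector draw_vector_alt
  dsimp only
  rw [show PySem.Int.floordiv 40 2 = (20 : Int) from by decide]
  by_cases h : (40 : Int) < (data.length : Int)
  · rw [if_pos h, if_pos h,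
      show decide ((40:Int) < (data.length : Int)) = true from decide_eq_true h]
    have hlen40 : 40 < data.length := by exact_mod_cast h
    rw [show (20 : Int) = ((20 : Nat) : Int) from by norm_num, pvRangeMapTake data 20 (by omega)]
    have htail : (PySem.List.pyRange ((data.length : Int) - ((20:Nat) : Int)) ((data.length : Int)) 1).map
        (fun i => PySem.Int.toChars (PySem.List.pyGetD data i 0)) =
        (data.drop (data.length - 20)).map (fun x => PySem.Int.toChars x) := by
      rw [show (fun i => PySem.Int.toChars (PySem.List.pyGetD data i 0)) =
          (PySem.Int.toChars ∘ fun i => PySem.List.pyGetD data i 0) from rfl,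
        ← List.map_map,
        PySem.List.map_pyGetD_pyRange' data 0 (by push_cast; omega)]
      have hnat : ((data.length : Int) - ((20:Nat) : Int)).toNat = data.length - 20 := by
        push_cast
        omega
      rw [hnat]
    rw [htail]
    have hall : ∀ it ∈ (data.take 20).map (fun x => PySem.Int.toChars x)
        ++ (data.drop (data.length - 20)).map (fun x => PySem.Int.toChars x),
        ∃ x, it = PySem.Int.toChars x := by
      intro it hit
      rcases List.mem_append.mp hit with hit | hit
      · exact pvAllToChars _ it hit
      · exact pvAllToChars _ it hit
    have hlens : ((data.take 20).map (fun x => PySem.Int.toChars x)).length = 20 := by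
      simp; omega
    have hlen : ((data.take 20).map (fun x => PySem.Int.toChars x)
        ++ (data.drop (data.length - 20)).map (fun x => PySem.Int.toChars x)).length = 40 := by
      simp; omega
    rw [pvRender_trunc _ hall hlen]
    rw [List.take_left' hlens, List.drop_left' hlens]
    rw [show PySem.List.slice data none (some ((20:Nat) : Int)) = data.take 20 from by
        rw [PySem.List.slice_to data (by norm_num)]; simp,
      show PySem.List.slice data (some (-((20:Nat) : Int))) none = data.drop (data.length - 20) from by
        rw [show ((20:Nat) : Int) = (20 : Int) from by norm_num]
        exact PySem.List.slice_from_neg_ofNat data 20 (by norm_num)]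
    simp only [List.map_append, List.map_map, List.map_cons, List.map_nil, Function.comp_def,
      pvBlock_fst, pvBlock_snd]
  · rw [if_neg h, if_neg h,
      show decide ((40:Int) < (data.length : Int)) = false from decide_eq_false h]
    rw [pvRender_notrunc _ (pvAllToChars data)]
    simp only [List.map_map, Function.comp_def, pvBlock_fst, pvBlock_snd]
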